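-- pv_equiv track=rewrite | github.com/Lightblues/Leetcode | algorithm-ds-templates/topics/力扣杯/21-autumn.py | maxmiumScore
-- ===== SOURCE A (Python) =====
-- from typing import List, Optional, Tuple
-- from itertools import product, permutations, combinations, combinations_with_replacement, accumulate
--
-- def maxmiumScore(cards: List[int], cnt: int) -> int:
--     odds, evens = [], []
--     for c in cards:
--         if c & 1: odds.append(c)
--         else: evens.append(c)
--     odds.sort(reverse=True); evens.sort(reverse=True)
--     oddcum = list(accumulate(odds, initial=0))
--     evencum = list(accumulate(evens, initial=0))
--     ans = 0
--     for i in range(0, cnt+1, 2):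
--         if i > len(odds) or cnt-i > len(evens): continue
--         ans = max(ans, oddcum[i] + evencum[cnt-i])
--     return ans
-- ===== SOURCE B (Python) =====
-- def maxmiumScore(cards, cnt):
--     # greedy: take the top cnt cards; if the sum's parity is wrong, fix it with one swap
--     if cnt < 0 or cnt > len(cards):
--         return 0
--     s = sorted(cards, reverse=True)
--     chosen, rest = s[:cnt], s[cnt:]
--     total = sum(chosen)
--     if total % 2 == 0:
--         return max(total, 0)
--     chosen_odds = [x for x in chosen if x % 2]
--     chosen_evens = [x for x in chosen if x % 2 == 0]
--     rest_odds = [x for x in rest if x % 2]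
--     rest_evens = [x for x in rest if x % 2 == 0]
--     best = 0
--     if chosen_odds and rest_evens:
--         best = max(best, total - chosen_odds[-1] + rest_evens[0])
--     if chosen_evens and rest_odds:
--         best = max(best, total - chosen_evens[-1] + rest_odds[0])
--     return best
-- ===== Notes on version B (the rewrite author's own statement) =====
-- stated objective: alternative
-- what changed: Instead of enumerating every even split between top-i odds and top-(cnt-i) evens over two sorted parity lists with prefix-sum tables, B sorts once, takes the top cnt cards and, when the sum's parity is odd, fixes it with the better of two single swaps (smallest chosen odd for largest rest even, or smallest chosen even for largest rest odd), flooring at 0.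
import Mathlib
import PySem

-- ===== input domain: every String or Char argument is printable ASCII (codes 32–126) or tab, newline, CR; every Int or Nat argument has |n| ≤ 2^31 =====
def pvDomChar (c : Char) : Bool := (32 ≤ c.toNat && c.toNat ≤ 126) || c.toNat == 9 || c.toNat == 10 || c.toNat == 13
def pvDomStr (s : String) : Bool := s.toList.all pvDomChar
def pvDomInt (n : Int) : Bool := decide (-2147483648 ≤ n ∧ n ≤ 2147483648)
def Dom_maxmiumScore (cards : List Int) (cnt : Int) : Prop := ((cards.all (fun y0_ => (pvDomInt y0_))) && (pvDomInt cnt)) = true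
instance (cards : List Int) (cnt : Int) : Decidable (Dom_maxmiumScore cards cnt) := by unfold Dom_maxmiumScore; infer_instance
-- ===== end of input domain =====

-- B replaces A's enumeration of all even odd/even splits by a single descending sort,
-- taking the top cnt cards and fixing an odd parity with the better of two single swaps.

-- ===== PORT A =====
def maxmiumScore (cards : List Int) (cnt : Int) : Int :=
  let p := cards.foldl (fun (acc : List Int × List Int) c =>
      if PySem.Int.band c 1 ≠ 0 then (acc.1 ++ [c], acc.2) else (acc.1, acc.2 ++ [c])) ([], [])
  let odds := PySem.List.sorted p.1 (fun x => x) true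
  let evens := PySem.List.sorted p.2 (fun x => x) true
  let oddcum := List.scanl (· + ·) 0 odds
  let evencum := List.scanl (· + ·) 0 evens
  (PySem.List.pyRange 0 (cnt + 1) 2).foldl (fun ans i =>
      if i > (odds.length : Int) ∨ cnt - i > (evens.length : Int) then ans
      else max ans (PySem.List.pyGetD oddcum i 0 + PySem.List.pyGetD evencum (cnt - i) 0)) 0

-- ===== PORT B =====
def maxmiumScore_alt (cards : List Int) (cnt : Int) : Int :=
  if cnt < 0 ∨ cnt > (cards.length : Int) then 0 else
  let s := PySem.List.sorted cards (fun x => x) true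
  let chosen := PySem.List.slice s none (some cnt)
  let rest := PySem.List.slice s (some cnt) none
  let total := chosen.sum
  if PySem.Int.mod total 2 = 0 then max total 0 else
  let chosenOdds := chosen.filter (fun x => PySem.Int.mod x 2 ≠ 0)
  let chosenEvens := chosen.filter (fun x => PySem.Int.mod x 2 = 0)
  let restOdds := rest.filter (fun x => PySem.Int.mod x 2 ≠ 0)
  let restEvens := rest.filter (fun x => PySem.Int.mod x 2 = 0)
  let best : Int := 0
  -- chosen_odds[-1] / rest_evens[0] are guarded nonempty, so pyGetD is exact here
  let best := if chosenOdds ≠ [] ∧ restEvens ≠ [] then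
      max best (total - PySem.List.pyGetD chosenOdds (-1) 0 + PySem.List.pyGetD restEvens 0 0) else best
  let best := if chosenEvens ≠ [] ∧ restOdds ≠ [] then
      max best (total - PySem.List.pyGetD chosenEvens (-1) 0 + PySem.List.pyGetD restOdds 0 0) else best
  best

-- ===== PRECONDITION & SPEC =====
def Spec_maxmiumScore (cards : List Int) (cnt : Int) (out : Int) : Prop := out = maxmiumScore_alt cards cnt
instance (cards : List Int) (cnt : Int) (out : Int) : Decidable (Spec_maxmiumScore cards cnt out) := by unfold Spec_maxmiumScore; infer_instance

-- ===== CLAIM (what is proved, stated in full; the proofs are below) =====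
def Claim_equal_maxmiumScore : Prop := ∀ (cards : List Int) (cnt : Int), Dom_maxmiumScore cards cnt → Spec_maxmiumScore cards cnt (maxmiumScore cards cnt)

-- ===== LEMMAS AND PROOFS =====

-- helper predicate: Python's truthiness of c % 2 (equivalently c & 1)
def podd (x : Int) : Bool := decide (PySem.Int.mod x 2 ≠ 0)

def dsortI (l : List Int) : List Int := PySem.List.sorted l (fun x => x) true

def OLst (cards : List Int) : List Int := dsortI (cards.filter podd)
def ELst (cards : List Int) : List Int := dsortI (cards.filter (fun x => !podd x))
def nO (cards : List Int) : Nat := (OLst cards).length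
def nE (cards : List Int) : Nat := (ELst cards).length
def i0v (cards : List Int) (k : Nat) : Nat := (((dsortI cards).take k).filter podd).length
def Fv (cards : List Int) (k i : Nat) : Int :=
  ((OLst cards).take i).sum + ((ELst cards).take (k - i)).sum

-- generic facts about A's running-max fold
theorem fm_init_le (f : Int → Int → Int) (hf : ∀ a i, a ≤ f a i) :
    ∀ (l : List Int) (init : Int), init ≤ l.foldl f init := by
  intro l
  induction l with
  | nil => intro init; exact le_refl _
  | cons x t ih =>
    intro init
    simp only [List.foldl_cons]
    exact le_trans (hf init x) (ih (f init x))

theorem fm_mem_le (f : Int → Int → Int) (g : Int → Int) (C : Int → Prop)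
    (hf : ∀ a i, a ≤ f a i) (hg : ∀ a i, ¬ C i → g i ≤ f a i) :
    ∀ (l : List Int) (init i : Int), i ∈ l → ¬ C i → g i ≤ l.foldl f init := by
  intro l
  induction l with
  | nil => intro _ i h; simp at h
  | cons x t ih =>
    intro init i hmem hci
    simp only [List.foldl_cons]
    rcases List.mem_cons.mp hmem with h | h
    · subst h
      exact le_trans (hg init i hci) (fm_init_le f hf t _)
    · exact ih _ i h hci

theorem fm_cases (f : Int → Int → Int) (g : Int → Int) (C : Int → Prop)
    (hfc : ∀ a i, f a i = a ∨ (¬ C i ∧ f a i = g i)) :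
    ∀ (l : List Int) (init : Int),
      l.foldl f init = init ∨ ∃ i ∈ l, ¬ C i ∧ l.foldl f init = g i := by
  intro l
  induction l with
  | nil => intro init; left; rfl
  | cons x t ih =>
    intro init
    simp only [List.foldl_cons]
    rcases ih (f init x) with h | ⟨i, hi, hci, h⟩
    · rcases hfc init x with hx | ⟨hcx, hx⟩
      · left; rw [h, hx]
      · right; exact ⟨x, List.mem_cons_self .., hcx, by rw [h, hx]⟩
    · right; exact ⟨i, List.mem_cons_of_mem _ hi, hci, h⟩

theorem scanl_add_getD : ∀ (l : List Int) (i : Nat) (a : Int), i ≤ l.length →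
    (List.scanl (· + ·) a l).getD i 0 = a + (l.take i).sum := by
  intro l
  induction l with
  | nil =>
    intro i a h
    have : i = 0 := Nat.le_zero.mp h
    subst this; simp
  | cons x t ih =>
    intro i a h
    cases i with
    | zero => simp
    | succ i =>
      simp only [List.scanl_cons, List.getD_cons_succ]
      rw [ih i (a + x) (by simpa using h)]
      simp [List.take_succ_cons]
      ring

theorem partition_foldl : ∀ (l : List Int) (a b : List Int),
    l.foldl (fun (acc : List Int × List Int) c =>
      if PySem.Int.band c 1 ≠ 0 then (acc.1 ++ [c], acc.2) else (acc.1, acc.2 ++ [c])) (a, b)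
    = (a ++ l.filter podd, b ++ l.filter (fun x => !podd x)) := by
  intro l
  induction l with
  | nil => intro a b; simp
  | cons x t ih =>
    intro a b
    simp only [List.foldl_cons, List.filter_cons]
    by_cases hx : PySem.Int.band x 1 ≠ 0
    · have hm : PySem.Int.mod x 2 ≠ 0 := by rw [← PySem.Int.band_one]; exact hx
      have hpx : podd x = true := decide_eq_true hm
      rw [if_pos hx, ih]
      simp [hpx, List.append_assoc]
    · have hm : ¬ PySem.Int.mod x 2 ≠ 0 := by rw [← PySem.Int.band_one]; exact hx
      have hpx : podd x = false := decide_eq_false hm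
      rw [if_neg hx, ih]
      simp [hpx, List.append_assoc]

theorem filter_dsort (cards : List Int) (p : Int → Bool) :
    (dsortI cards).filter p = dsortI (cards.filter p) := by
  apply List.eq_of_perm_of_sorted (le := fun a b : Int => b ≤ a)
  · intro a b _ _ h1 h2; exact le_antisymm h2 h1
  · exact (PySem.List.sorted_pairwise_rev cards (fun x => x)).filter p
  · exact PySem.List.sorted_pairwise_rev (cards.filter p) (fun x => x)
  · exact ((PySem.List.sorted_perm cards _ true).filter p).trans
      ((PySem.List.sorted_perm (cards.filter p) _ true).symm)

theorem filter_take_eq (l : List Int) (p : Int → Bool) (k : Nat) :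
    (l.take k).filter p = (l.filter p).take ((l.take k).filter p).length := by
  exact List.prefix_iff_eq_take.mp (List.IsPrefix.filter p (List.take_prefix k l))

theorem filter_drop_eq (l : List Int) (p : Int → Bool) (k : Nat) :
    (l.drop k).filter p = (l.filter p).drop ((l.take k).filter p).length := by
  have h : (l.filter p).take ((l.take k).filter p).length ++ (l.drop k).filter p
      = (l.filter p).take ((l.take k).filter p).length ++ (l.filter p).drop ((l.take k).filter p).length := by
    rw [List.take_append_drop]
    rw [← filter_take_eq]
    rw [← List.filter_append, List.take_append_drop]
  exact List.append_cancel_left h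

theorem chosen_odds_eq (cards : List Int) (k : Nat) :
    ((dsortI cards).take k).filter podd = (OLst cards).take (i0v cards k) := by
  have h := List.prefix_iff_eq_take.mp (List.IsPrefix.filter podd (List.take_prefix k (dsortI cards)))
  rw [filter_dsort] at h
  exact h

theorem i0_le_k (cards : List Int) (k : Nat) : i0v cards k ≤ k := by
  unfold i0v
  exact le_trans (List.length_filter_le _ _) (List.length_take_le _ _)

theorem i0_le_nO (cards : List Int) (k : Nat) : i0v cards k ≤ nO cards := by
  have h := (List.IsPrefix.filter podd (List.take_prefix k (dsortI cards))).length_le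
  unfold i0v nO OLst
  rw [← filter_dsort]
  exact h

theorem chosen_evens_len (cards : List Int) (k : Nat) (hk : k ≤ cards.length) :
    (((dsortI cards).take k).filter (fun x => !podd x)).length = k - i0v cards k := by
  have hp := (List.filter_append_perm podd ((dsortI cards).take k)).length_eq
  have hlen : (dsortI cards).length = cards.length := PySem.List.length_sorted _ _ _
  simp only [List.length_append] at hp
  rw [List.length_take, hlen] at hp
  unfold i0v
  omega

theorem chosen_evens_eq (cards : List Int) (k : Nat) (hk : k ≤ cards.length) :
    ((dsortI cards).take k).filter (fun x => !podd x) = (ELst cards).take (k - i0v cards k) := by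
  rw [filter_take_eq, chosen_evens_len cards k hk]
  unfold ELst
  rw [filter_dsort]

theorem rest_odds_eq (cards : List Int) (k : Nat) :
    ((dsortI cards).drop k).filter podd = (OLst cards).drop (i0v cards k) := by
  unfold i0v OLst
  rw [filter_drop_eq, filter_dsort]

theorem rest_evens_eq (cards : List Int) (k : Nat) (hk : k ≤ cards.length) :
    ((dsortI cards).drop k).filter (fun x => !podd x) = (ELst cards).drop (k - i0v cards k) := by
  rw [filter_drop_eq, chosen_evens_len cards k hk]
  unfold ELst
  rw [filter_dsort]

theorem k_sub_i0_le_nE (cards : List Int) (k : Nat) (hk : k ≤ cards.length) :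
    k - i0v cards k ≤ nE cards := by
  have h := congrArg List.length (chosen_evens_eq cards k hk)
  rw [chosen_evens_len cards k hk, List.length_take] at h
  unfold nE
  omega

theorem nO_add_nE (cards : List Int) : nO cards + nE cards = cards.length := by
  have hp := (List.filter_append_perm podd cards).length_eq
  simp only [List.length_append] at hp
  unfold nO nE OLst ELst dsortI
  rw [PySem.List.length_sorted, PySem.List.length_sorted]
  omega

theorem total_eq (cards : List Int) (k : Nat) (hk : k ≤ cards.length) :
    ((dsortI cards).take k).sum = Fv cards k (i0v cards k) := by
  have hp := (List.filter_append_perm podd ((dsortI cards).take k)).sum_eq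
  rw [List.sum_append] at hp
  rw [← hp, chosen_odds_eq, chosen_evens_eq cards k hk]
  rfl

theorem cross_le (cards : List Int) (k : Nat) :
    ∀ x ∈ (dsortI cards).take k, ∀ y ∈ (dsortI cards).drop k, y ≤ x := by
  have hp := PySem.List.sorted_pairwise_rev cards (fun x => x)
  have heq : dsortI cards = (dsortI cards).take k ++ (dsortI cards).drop k :=
    (List.take_append_drop k _).symm
  rw [show PySem.List.sorted cards (fun x => x) true = dsortI cards from rfl, heq] at hp
  exact (List.pairwise_append.mp hp).2.2

theorem mem_OLst_odd (cards : List Int) : ∀ x ∈ OLst cards, x % 2 = 1 := by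
  intro x hx
  have hmem : x ∈ (cards.filter podd) := (PySem.List.mem_sorted _ _ _ _).mp hx
  have hodd : podd x := (List.mem_filter.mp hmem).2
  simp only [podd, decide_eq_true_eq] at hodd
  rw [PySem.Int.mod_eq_emod_of_pos (by norm_num)] at hodd
  rcases Int.emod_two_eq x with h | h
  · exact absurd h hodd
  · exact h

theorem mem_ELst_even (cards : List Int) : ∀ x ∈ ELst cards, x % 2 = 0 := by
  intro x hx
  have hmem : x ∈ (cards.filter (fun x => !podd x)) := (PySem.List.mem_sorted _ _ _ _).mp hx
  have hev := (List.mem_filter.mp hmem).2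
  simp only [podd, Bool.not_eq_true', decide_eq_false_iff_not, not_not] at hev
  rw [PySem.Int.mod_eq_emod_of_pos (by norm_num)] at hev
  exact hev

theorem sum_parity_odd : ∀ l : List Int, (∀ x ∈ l, x % 2 = 1) →
    l.sum % 2 = (l.length : Int) % 2 := by
  intro l
  induction l with
  | nil => simp
  | cons x t ih =>
    intro h
    have hx := h x (List.mem_cons_self ..)
    have ht := ih (fun y hy => h y (List.mem_cons_of_mem _ hy))
    simp only [List.sum_cons, List.length_cons]
    push_cast
    omega

theorem sum_parity_even : ∀ l : List Int, (∀ x ∈ l, x % 2 = 0) → l.sum % 2 = 0 := by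
  intro l
  induction l with
  | nil => simp
  | cons x t ih =>
    intro h
    have hx := h x (List.mem_cons_self ..)
    have ht := ih (fun y hy => h y (List.mem_cons_of_mem _ hy))
    simp only [List.sum_cons]
    omega

theorem total_parity (cards : List Int) (k : Nat) (_hk : k ≤ cards.length) :
    Fv cards k (i0v cards k) % 2 = ((i0v cards k : Nat) : Int) % 2 := by
  unfold Fv
  have h1 := sum_parity_odd ((OLst cards).take (i0v cards k))
    (fun x hx => mem_OLst_odd cards x (List.mem_of_mem_take hx))
  have h2 := sum_parity_even ((ELst cards).take (k - i0v cards k))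
    (fun x hx => mem_ELst_even cards x (List.mem_of_mem_take hx))
  have h3 : ((OLst cards).take (i0v cards k)).length = i0v cards k := by
    rw [List.length_take]
    exact Nat.min_eq_left (i0_le_nO cards k)
  rw [h3] at h1
  omega

theorem getElem_mem_drop (l : List Int) (m j : Nat) (h : j < l.length) (hmj : m ≤ j) :
    l[j] ∈ l.drop m := by
  have hlt : j - m < (l.drop m).length := by
    rw [List.length_drop]; omega
  have h2 := List.getElem_mem hlt
  have h3 : (l.drop m)[j - m]'hlt = l[j]'h := by
    rw [List.getElem_drop]
    congr 1
    omega
  rwa [h3] at h2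

theorem getElem_mem_take (l : List Int) (m j : Nat) (h : j < l.length) (hmj : j < m) :
    l[j] ∈ l.take m := by
  have hlt : j < (l.take m).length := by
    rw [List.length_take]; omega
  have h2 := List.getElem_mem hlt
  rwa [List.getElem_take] at h2

theorem Fv_succ (cards : List Int) (k i j : Nat) (hiO : i < nO cards)
    (hj : k - i = j + 1) (hjE : j < nE cards) :
    Fv cards k (i+1) = Fv cards k i + (OLst cards)[i]'hiO - (ELst cards)[j]'hjE := by
  unfold Fv
  have h2 : k - (i+1) = j := by omega
  rw [h2, hj, List.sum_take_succ _ i hiO, List.sum_take_succ _ j hjE]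
  ring

theorem mono_up (cards : List Int) (k : Nat) (hk : k ≤ cards.length) :
    ∀ (d i : Nat), i + d ≤ i0v cards k → k - i ≤ nE cards →
      Fv cards k i ≤ Fv cards k (i + d) := by
  intro d
  induction d with
  | zero => intro i _ _; simp
  | succ d ih =>
    intro i h hE
    have hi : i < i0v cards k := by omega
    have hiO : i < nO cards := lt_of_lt_of_le hi (i0_le_nO cards k)
    have hik : i < k := lt_of_lt_of_le hi (i0_le_k cards k)
    have hj : k - i = (k - i - 1) + 1 := by omega
    have hjE : k - i - 1 < nE cards := by omega
    have step : Fv cards k i ≤ Fv cards k (i + 1) := by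
      rw [Fv_succ cards k i (k - i - 1) hiO hj hjE]
      have hOc : (OLst cards)[i]'hiO ∈ (dsortI cards).take k := by
        have hmem := getElem_mem_take (OLst cards) (i0v cards k) i hiO hi
        rw [← chosen_odds_eq] at hmem
        exact List.mem_of_mem_filter hmem
      have hEr : (ELst cards)[k - i - 1]'hjE ∈ (dsortI cards).drop k := by
        have hmem := getElem_mem_drop (ELst cards) (k - i0v cards k) (k - i - 1) hjE (by omega)
        rw [← rest_evens_eq cards k hk] at hmem
        exact List.mem_of_mem_filter hmem
      have hle := cross_le cards k _ hOc _ hEr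
      omega
    have hrest := ih (i + 1) (by omega) (by omega)
    have harith : i + (d + 1) = (i + 1) + d := by omega
    rw [harith]
    exact le_trans step hrest

theorem mono_down (cards : List Int) (k : Nat) (hk : k ≤ cards.length) :
    ∀ (d i : Nat), i0v cards k ≤ i → i + d ≤ nO cards → i + d ≤ k →
      Fv cards k (i + d) ≤ Fv cards k i := by
  intro d
  induction d with
  | zero => intro i _ _ _; simp
  | succ d ih =>
    intro i hi0 hO hk'
    have hstep : Fv cards k (i + 1) ≤ Fv cards k i := by
      have hiO : i < nO cards := by omega
      have hik : i < k := by omega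
      have hkE := k_sub_i0_le_nE cards k hk
      have hj : k - i = (k - i - 1) + 1 := by omega
      have hjE : k - i - 1 < nE cards := by omega
      rw [Fv_succ cards k i (k - i - 1) hiO hj hjE]
      have hOr : (OLst cards)[i]'hiO ∈ (dsortI cards).drop k := by
        have hmem := getElem_mem_drop (OLst cards) (i0v cards k) i hiO hi0
        rw [← rest_odds_eq cards k] at hmem
        exact List.mem_of_mem_filter hmem
      have hEc : (ELst cards)[k - i - 1]'hjE ∈ (dsortI cards).take k := by
        have hmem := getElem_mem_take (ELst cards) (k - i0v cards k) (k - i - 1) hjE (by omega)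
        rw [← chosen_evens_eq cards k hk] at hmem
        exact List.mem_of_mem_filter hmem
      have hle := cross_le cards k _ hEc _ hOr
      omega
    have hrest := ih (i + 1) (by omega) (by omega) (by omega)
    have harith : i + (d + 1) = (i + 1) + d := by omega
    rw [harith]
    exact le_trans hrest hstep

theorem head_drop (l : List Int) (m : Nat) (hm : m < l.length) :
    PySem.List.pyGetD (l.drop m) 0 0 = l[m] := by
  rw [PySem.List.pyGetD_zero]
  have h0 : 0 < (l.drop m).length := by rw [List.length_drop]; omega
  rw [List.getD_eq_getElem _ _ h0, List.getElem_drop]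
  congr 1

theorem last_take (l : List Int) (m : Nat) (h1 : 1 ≤ m) (hm : m ≤ l.length)
    (hlt : m - 1 < l.length) :
    PySem.List.pyGetD (l.take m) (-1) 0 = l[m-1]'hlt := by
  have hlen : (l.take m).length = m := by
    rw [List.length_take]; omega
  have hne : l.take m ≠ [] := by
    intro hcontra
    rw [hcontra] at hlen
    simp at hlen
    omega
  rw [PySem.List.pyGetD_neg_one _ _ hne, List.getLast_eq_getElem, List.getElem_take]
  congr 1
  rw [hlen]

theorem cand1_val (cards : List Int) (k : Nat) (hk : k ≤ cards.length)
    (h1 : 1 ≤ i0v cards k) (hre : k - i0v cards k < nE cards) :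
    Fv cards k (i0v cards k)
      - PySem.List.pyGetD (((dsortI cards).take k).filter podd) (-1) 0
      + PySem.List.pyGetD (((dsortI cards).drop k).filter (fun x => !podd x)) 0 0
    = Fv cards k (i0v cards k - 1) := by
  have hi0k := i0_le_k cards k
  have hi0O := i0_le_nO cards k
  have hiO : i0v cards k - 1 < nO cards := by omega
  have hlast : PySem.List.pyGetD (((dsortI cards).take k).filter podd) (-1) 0
      = (OLst cards)[i0v cards k - 1]'hiO := by
    rw [chosen_odds_eq]
    exact last_take (OLst cards) (i0v cards k) h1 hi0O hiO
  have hhead : PySem.List.pyGetD (((dsortI cards).drop k).filter (fun x => !podd x)) 0 0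
      = (ELst cards)[k - i0v cards k]'hre := by
    rw [rest_evens_eq cards k hk]
    exact head_drop (ELst cards) (k - i0v cards k) hre
  have hstep := Fv_succ cards k (i0v cards k - 1) (k - i0v cards k) hiO (by omega) hre
  have harith : i0v cards k - 1 + 1 = i0v cards k := by omega
  rw [harith] at hstep
  rw [hlast, hhead]
  omega

theorem cand2_val (cards : List Int) (k : Nat) (hk : k ≤ cards.length)
    (hce : i0v cards k < k) (hro : i0v cards k < nO cards) :
    Fv cards k (i0v cards k)
      - PySem.List.pyGetD (((dsortI cards).take k).filter (fun x => !podd x)) (-1) 0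
      + PySem.List.pyGetD (((dsortI cards).drop k).filter podd) 0 0
    = Fv cards k (i0v cards k + 1) := by
  have hkE := k_sub_i0_le_nE cards k hk
  have hlgE : k - i0v cards k - 1 < nE cards := by omega
  have hlast : PySem.List.pyGetD (((dsortI cards).take k).filter (fun x => !podd x)) (-1) 0
      = (ELst cards)[k - i0v cards k - 1]'hlgE := by
    rw [chosen_evens_eq cards k hk]
    exact last_take (ELst cards) (k - i0v cards k) (by omega) hkE hlgE
  have hhead : PySem.List.pyGetD (((dsortI cards).drop k).filter podd) 0 0
      = (OLst cards)[i0v cards k]'hro := by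
    rw [rest_odds_eq cards k]
    exact head_drop (OLst cards) (i0v cards k) hro
  have hstep := Fv_succ cards k (i0v cards k) (k - i0v cards k - 1) hro (by omega) hlgE
  rw [hlast, hhead]
  omega

theorem A_norm (cards : List Int) (cnt : Int) :
    maxmiumScore cards cnt =
      (PySem.List.pyRange 0 (cnt + 1) 2).foldl (fun ans i =>
        if i > ((nO cards : Nat) : Int) ∨ cnt - i > ((nE cards : Nat) : Int) then ans
        else max ans (PySem.List.pyGetD (List.scanl (· + ·) 0 (OLst cards)) i 0 +
                      PySem.List.pyGetD (List.scanl (· + ·) 0 (ELst cards)) (cnt - i) 0)) 0 := by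
  unfold maxmiumScore
  rw [partition_foldl]
  simp only [List.nil_append]
  rfl

theorem B_norm (cards : List Int) (cnt : Int) (h0 : 0 ≤ cnt) (hn : cnt ≤ (cards.length : Int)) :
    maxmiumScore_alt cards cnt =
      (if PySem.Int.mod (((dsortI cards).take cnt.toNat).sum) 2 = 0 then
        max (((dsortI cards).take cnt.toNat).sum) 0
      else
        if ((dsortI cards).take cnt.toNat).filter (fun x => !podd x) ≠ [] ∧
           ((dsortI cards).drop cnt.toNat).filter podd ≠ [] then
          max (if ((dsortI cards).take cnt.toNat).filter podd ≠ [] ∧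
                  ((dsortI cards).drop cnt.toNat).filter (fun x => !podd x) ≠ [] then
                 max 0 (((dsortI cards).take cnt.toNat).sum
                   - PySem.List.pyGetD (((dsortI cards).take cnt.toNat).filter podd) (-1) 0
                   + PySem.List.pyGetD (((dsortI cards).drop cnt.toNat).filter (fun x => !podd x)) 0 0)
               else 0)
              (((dsortI cards).take cnt.toNat).sum
                - PySem.List.pyGetD (((dsortI cards).take cnt.toNat).filter (fun x => !podd x)) (-1) 0
                + PySem.List.pyGetD (((dsortI cards).drop cnt.toNat).filter podd) 0 0)
        else
          if ((dsortI cards).take cnt.toNat).filter podd ≠ [] ∧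
             ((dsortI cards).drop cnt.toNat).filter (fun x => !podd x) ≠ [] then
            max 0 (((dsortI cards).take cnt.toNat).sum
              - PySem.List.pyGetD (((dsortI cards).take cnt.toNat).filter podd) (-1) 0
              + PySem.List.pyGetD (((dsortI cards).drop cnt.toNat).filter (fun x => !podd x)) 0 0)
          else 0) := by
  have hp2 : (fun x : Int => decide (PySem.Int.mod x 2 = 0)) = (fun x : Int => !podd x) := by
    funext x
    simp only [podd, decide_not, Bool.not_not]
  simp only [maxmiumScore_alt]
  rw [if_neg (by omega)]
  rw [PySem.List.slice_to _ h0, PySem.List.slice_from _ h0]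
  simp only [hp2]
  rfl

theorem A_ge_zero (cards : List Int) (cnt : Int) : 0 ≤ maxmiumScore cards cnt := by
  rw [A_norm]
  exact fm_init_le _
    (by intro a j; split_ifs; exacts [le_refl a, le_max_left _ _]) _ 0

theorem A_ge (cards : List Int) (cnt : Int) (i : Int)
    (hmem : i ∈ PySem.List.pyRange 0 (cnt + 1) 2)
    (hC : ¬ (i > ((nO cards : Nat) : Int) ∨ cnt - i > ((nE cards : Nat) : Int))) :
    PySem.List.pyGetD (List.scanl (· + ·) 0 (OLst cards)) i 0 +
      PySem.List.pyGetD (List.scanl (· + ·) 0 (ELst cards)) (cnt - i) 0 ≤ maxmiumScore cards cnt := by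
  rw [A_norm]
  exact fm_mem_le _
    (fun j => PySem.List.pyGetD (List.scanl (· + ·) 0 (OLst cards)) j 0 +
      PySem.List.pyGetD (List.scanl (· + ·) 0 (ELst cards)) (cnt - j) 0)
    (fun j => j > ((nO cards : Nat) : Int) ∨ cnt - j > ((nE cards : Nat) : Int))
    (by intro a j; split_ifs; exacts [le_refl a, le_max_left _ _])
    (by intro a j hj; rw [if_neg hj]; exact le_max_right _ _)
    _ 0 i hmem hC

theorem A_cases (cards : List Int) (cnt : Int) :
    maxmiumScore cards cnt = 0 ∨
    ∃ i ∈ PySem.List.pyRange 0 (cnt + 1) 2,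
      ¬ (i > ((nO cards : Nat) : Int) ∨ cnt - i > ((nE cards : Nat) : Int)) ∧
      maxmiumScore cards cnt =
        PySem.List.pyGetD (List.scanl (· + ·) 0 (OLst cards)) i 0 +
        PySem.List.pyGetD (List.scanl (· + ·) 0 (ELst cards)) (cnt - i) 0 := by
  rw [A_norm]
  apply fm_cases _
    (fun j => PySem.List.pyGetD (List.scanl (· + ·) 0 (OLst cards)) j 0 +
      PySem.List.pyGetD (List.scanl (· + ·) 0 (ELst cards)) (cnt - j) 0)
    (fun j => j > ((nO cards : Nat) : Int) ∨ cnt - j > ((nE cards : Nat) : Int))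
  intro a j
  (try dsimp only)
  by_cases hj : j > ((nO cards : Nat) : Int) ∨ cnt - j > ((nE cards : Nat) : Int)
  · left; rw [if_pos hj]
  · rw [if_neg hj]
    rcases max_choice a (PySem.List.pyGetD (List.scanl (· + ·) 0 (OLst cards)) j 0 +
      PySem.List.pyGetD (List.scanl (· + ·) 0 (ELst cards)) (cnt - j) 0) with h | h
    · left; exact h
    · right; exact ⟨hj, h⟩

theorem g_val (cards : List Int) (cnt : Int) (m : Nat) (h0 : 0 ≤ cnt) (hm : m ≤ cnt.toNat)
    (hmO : m ≤ nO cards) (hmE : cnt.toNat - m ≤ nE cards) :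
    PySem.List.pyGetD (List.scanl (· + ·) 0 (OLst cards)) ((m : Nat) : Int) 0 +
      PySem.List.pyGetD (List.scanl (· + ·) 0 (ELst cards)) (cnt - ((m : Nat) : Int)) 0
    = Fv cards cnt.toNat m := by
  have h2 : cnt - ((m : Nat) : Int) = ((cnt.toNat - m : Nat) : Int) := by omega
  rw [h2, PySem.List.pyGetD_natCast, PySem.List.pyGetD_natCast,
    scanl_add_getD _ _ _ hmO, scanl_add_getD _ _ _ hmE]
  unfold Fv
  ring

theorem A_ge_Fv (cards : List Int) (cnt : Int) (h0 : 0 ≤ cnt) (m : Nat)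
    (hm : m ≤ cnt.toNat) (hmO : m ≤ nO cards) (hmE : cnt.toNat - m ≤ nE cards)
    (hpar : m % 2 = 0) :
    Fv cards cnt.toNat m ≤ maxmiumScore cards cnt := by
  rw [← g_val cards cnt m h0 hm hmO hmE]
  apply A_ge
  · rw [PySem.List.mem_pyRange_iff_of_pos (by norm_num)]
    refine ⟨by omega, by omega, by omega⟩
  · simp only [not_or, not_lt]
    constructor <;> omega

theorem A_cases_Fv (cards : List Int) (cnt : Int) (h0 : 0 ≤ cnt) :
    maxmiumScore cards cnt = 0 ∨
    ∃ m : Nat, m ≤ cnt.toNat ∧ m ≤ nO cards ∧ cnt.toNat - m ≤ nE cards ∧ m % 2 = 0 ∧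
      maxmiumScore cards cnt = Fv cards cnt.toNat m := by
  rcases A_cases cards cnt with hA | ⟨i, hmem, hCi, hA⟩
  · left; exact hA
  · right
    rw [PySem.List.mem_pyRange_iff_of_pos (by norm_num)] at hmem
    obtain ⟨h1, h2, h3⟩ := hmem
    simp only [not_or, not_lt] at hCi
    refine ⟨i.toNat, by omega, by omega, by omega, by omega, ?_⟩
    have hi : i = ((i.toNat : Nat) : Int) := by omega
    rw [hi] at hA
    rw [hA]
    exact g_val cards cnt i.toNat h0 (by omega) (by omega) (by omega)

theorem core_eq (cards : List Int) (cnt : Int) (h0 : 0 ≤ cnt) (hn : cnt ≤ (cards.length : Int)) :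
    maxmiumScore cards cnt = maxmiumScore_alt cards cnt := by
  have hk : cnt.toNat ≤ cards.length := by omega
  have hi0k := i0_le_k cards cnt.toNat
  have hi0O := i0_le_nO cards cnt.toNat
  have hkE := k_sub_i0_le_nE cards cnt.toNat hk
  rw [B_norm cards cnt h0 hn, total_eq cards cnt.toNat hk]
  have heven : (PySem.Int.mod (Fv cards cnt.toNat (i0v cards cnt.toNat)) 2 = 0) ↔
      (i0v cards cnt.toNat) % 2 = 0 := by
    rw [PySem.Int.mod_eq_emod_of_pos (by norm_num)]
    have hp := total_parity cards cnt.toNat hk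
    constructor <;> intro h <;> omega
  by_cases hpar : i0v cards cnt.toNat % 2 = 0
  · rw [if_pos (heven.mpr hpar)]
    apply le_antisymm
    · rcases A_cases_Fv cards cnt h0 with hA | ⟨m, hm1, hm2, hm3, hm4, hA⟩
      · rw [hA]; exact le_max_right _ _
      · rw [hA]
        refine le_trans ?_ (le_max_left _ _)
        by_cases hc : m ≤ i0v cards cnt.toNat
        · have hmo := mono_up cards cnt.toNat hk (i0v cards cnt.toNat - m) m (by omega) (by omega)
          have ha : m + (i0v cards cnt.toNat - m) = i0v cards cnt.toNat := by omega
          rwa [ha] at hmo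
        · have hmo := mono_down cards cnt.toNat hk (m - i0v cards cnt.toNat)
            (i0v cards cnt.toNat) (le_refl _) (by omega) (by omega)
          have ha : i0v cards cnt.toNat + (m - i0v cards cnt.toNat) = m := by omega
          rwa [ha] at hmo
    · apply max_le
      · exact A_ge_Fv cards cnt h0 (i0v cards cnt.toNat) hi0k hi0O hkE hpar
      · exact A_ge_zero cards cnt
  · rw [if_neg (fun hc => hpar (heven.mp hc))]
    have hco : ((dsortI cards).take cnt.toNat).filter podd ≠ [] := by
      intro hnil
      have hcoeq : (((dsortI cards).take cnt.toNat).filter podd).length = i0v cards cnt.toNat := rfl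
      rw [hnil] at hcoeq
      simp at hcoeq
      omega
    have hre_iff : ((dsortI cards).drop cnt.toNat).filter (fun x => !podd x) ≠ [] ↔
        cnt.toNat - i0v cards cnt.toNat < nE cards := by
      rw [rest_evens_eq cards cnt.toNat hk]
      simp only [ne_eq, List.drop_eq_nil_iff, not_le]
      exact Iff.rfl
    have hro_iff : ((dsortI cards).drop cnt.toNat).filter podd ≠ [] ↔
        i0v cards cnt.toNat < nO cards := by
      rw [rest_odds_eq cards cnt.toNat]
      simp only [ne_eq, List.drop_eq_nil_iff, not_le]
      exact Iff.rfl
    have hce_iff : ((dsortI cards).take cnt.toNat).filter (fun x => !podd x) ≠ [] ↔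
        i0v cards cnt.toNat < cnt.toNat := by
      have hcel := chosen_evens_len cards cnt.toNat hk
      constructor
      · intro h
        have h1 := List.length_pos_of_ne_nil h
        omega
      · intro h
        apply List.ne_nil_of_length_pos
        omega
    by_cases hg2 : ((dsortI cards).take cnt.toNat).filter (fun x => !podd x) ≠ [] ∧
        ((dsortI cards).drop cnt.toNat).filter podd ≠ []
    · rw [if_pos hg2]
      have hikk := hce_iff.mp hg2.1
      have hinO := hro_iff.mp hg2.2
      have hc2 := cand2_val cards cnt.toNat hk hikk hinO
      by_cases hg1 : ((dsortI cards).take cnt.toNat).filter podd ≠ [] ∧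
          ((dsortI cards).drop cnt.toNat).filter (fun x => !podd x) ≠ []
      · rw [if_pos hg1]
        have hreE := hre_iff.mp hg1.2
        have hc1 := cand1_val cards cnt.toNat hk (by omega) hreE
        rw [hc1, hc2]
        apply le_antisymm
        · rcases A_cases_Fv cards cnt h0 with hA | ⟨m, hm1, hm2, hm3, hm4, hA⟩
          · rw [hA]
            exact le_trans (le_max_left 0 _) (le_max_left _ _)
          · rw [hA]
            by_cases hc : m < i0v cards cnt.toNat
            · refine le_trans (le_trans ?_ (le_max_right 0 _)) (le_max_left _ _)
              have hmo := mono_up cards cnt.toNat hk (i0v cards cnt.toNat - 1 - m) m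
                (by omega) (by omega)
              have ha : m + (i0v cards cnt.toNat - 1 - m) = i0v cards cnt.toNat - 1 := by omega
              rwa [ha] at hmo
            · refine le_trans ?_ (le_max_right _ _)
              have hmo := mono_down cards cnt.toNat hk (m - (i0v cards cnt.toNat + 1))
                (i0v cards cnt.toNat + 1) (by omega) (by omega) (by omega)
              have ha : i0v cards cnt.toNat + 1 + (m - (i0v cards cnt.toNat + 1)) = m := by omega
              rwa [ha] at hmo
        · apply max_le
          · apply max_le
            · exact A_ge_zero cards cnt
            · exact A_ge_Fv cards cnt h0 (i0v cards cnt.toNat - 1)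
                (by omega) (by omega) (by omega) (by omega)
          · exact A_ge_Fv cards cnt h0 (i0v cards cnt.toNat + 1)
              (by omega) (by omega) (by omega) (by omega)
      · rw [if_neg hg1]
        rw [hc2]
        apply le_antisymm
        · rcases A_cases_Fv cards cnt h0 with hA | ⟨m, hm1, hm2, hm3, hm4, hA⟩
          · rw [hA]; exact le_max_left 0 _
          · rw [hA]
            by_cases hc : m < i0v cards cnt.toNat
            · exact absurd ⟨hco, hre_iff.mpr (by omega)⟩ hg1
            · refine le_trans ?_ (le_max_right 0 _)
              have hmo := mono_down cards cnt.toNat hk (m - (i0v cards cnt.toNat + 1))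
                (i0v cards cnt.toNat + 1) (by omega) (by omega) (by omega)
              have ha : i0v cards cnt.toNat + 1 + (m - (i0v cards cnt.toNat + 1)) = m := by omega
              rwa [ha] at hmo
        · apply max_le
          · exact A_ge_zero cards cnt
          · exact A_ge_Fv cards cnt h0 (i0v cards cnt.toNat + 1)
              (by omega) (by omega) (by omega) (by omega)
    · rw [if_neg hg2]
      by_cases hg1 : ((dsortI cards).take cnt.toNat).filter podd ≠ [] ∧
          ((dsortI cards).drop cnt.toNat).filter (fun x => !podd x) ≠ []
      · rw [if_pos hg1]
        have hreE := hre_iff.mp hg1.2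
        have hc1 := cand1_val cards cnt.toNat hk (by omega) hreE
        rw [hc1]
        apply le_antisymm
        · rcases A_cases_Fv cards cnt h0 with hA | ⟨m, hm1, hm2, hm3, hm4, hA⟩
          · rw [hA]; exact le_max_left 0 _
          · rw [hA]
            by_cases hc : m < i0v cards cnt.toNat
            · refine le_trans ?_ (le_max_right 0 _)
              have hmo := mono_up cards cnt.toNat hk (i0v cards cnt.toNat - 1 - m) m
                (by omega) (by omega)
              have ha : m + (i0v cards cnt.toNat - 1 - m) = i0v cards cnt.toNat - 1 := by omega
              rwa [ha] at hmo
            · exact absurd ⟨hce_iff.mpr (by omega), hro_iff.mpr (by omega)⟩ hg2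
        · apply max_le
          · exact A_ge_zero cards cnt
          · exact A_ge_Fv cards cnt h0 (i0v cards cnt.toNat - 1)
              (by omega) (by omega) (by omega) (by omega)
      · rw [if_neg hg1]
        apply le_antisymm
        · rcases A_cases_Fv cards cnt h0 with hA | ⟨m, hm1, hm2, hm3, hm4, hA⟩
          · exact le_of_eq hA
          · by_cases hc : m < i0v cards cnt.toNat
            · exact absurd ⟨hco, hre_iff.mpr (by omega)⟩ hg1
            · exact absurd ⟨hce_iff.mpr (by omega), hro_iff.mpr (by omega)⟩ hg2
        · exact A_ge_zero cards cnt

theorem full_eq (cards : List Int) (cnt : Int) :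
    maxmiumScore cards cnt = maxmiumScore_alt cards cnt := by
  by_cases h0 : 0 ≤ cnt
  · by_cases hn : cnt ≤ (cards.length : Int)
    · exact core_eq cards cnt h0 hn
    · have hB : maxmiumScore_alt cards cnt = 0 := by
        simp only [maxmiumScore_alt]
        rw [if_pos (Or.inr (by omega))]
      rw [hB]
      rcases A_cases cards cnt with hA | ⟨i, hmem, hCi, hA⟩
      · exact hA
      · exfalso
        rw [PySem.List.mem_pyRange_iff_of_pos (by norm_num)] at hmem
        simp only [not_or, not_lt] at hCi
        have hOE := nO_add_nE cards
        omega
  · have hB : maxmiumScore_alt cards cnt = 0 := by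
      simp only [maxmiumScore_alt]
      rw [if_pos (Or.inl (by omega))]
    rw [hB]
    rcases A_cases cards cnt with hA | ⟨i, hmem, hCi, hA⟩
    · exact hA
    · exfalso
      rw [PySem.List.mem_pyRange_iff_of_pos (by norm_num)] at hmem
      omega

-- ===== VERDICT (by name: the statement is the Claim_ definition above) =====
theorem maxmiumScore_spec : Claim_equal_maxmiumScore := by
  intro cards cnt _
  unfold Spec_maxmiumScore
  exact full_eq cards cnt
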